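-- pv_equiv track=rewrite | github.com/2020-ASW/kwoneyng-Park | 4월 4주차/스코빌 지수.py | solution
-- ===== SOURCE A (Python) =====
-- from heapq import heappop,heappush
--
-- def solution(scoville, K):
--     answer = 0
--     hq = []
--     for i in scoville:
--         heappush(hq,i)
--
--     while hq[0] < K:
--         if len(hq) >= 2:
--             answer += 1
--             heappush(hq,heappop(hq)+heappop(hq)*2)
--         else:
--             return -1
--     return answer
-- ===== SOURCE B (Python) =====
-- def solution(scoville, K):
--     lst = sorted(scoville)
--     answer = 0
--     while lst[0] < K:
--         if len(lst) < 2: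
--             return -1
--         a = lst.pop(0)
--         b = lst.pop(0)
--         x = a + b * 2
--         i = 0
--         while i < len(lst) and lst[i] < x:
--             i += 1
--         lst.insert(i, x)
--         answer += 1
--     return answer
-- ===== Notes on version B (the rewrite author's own statement) =====
-- stated objective: simpler
-- what changed: Replaces the binary heap with a plain sorted list: pop the two front (smallest) elements and reinsert the mix by linear insertion, keeping the list sorted.
import Mathlib
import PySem

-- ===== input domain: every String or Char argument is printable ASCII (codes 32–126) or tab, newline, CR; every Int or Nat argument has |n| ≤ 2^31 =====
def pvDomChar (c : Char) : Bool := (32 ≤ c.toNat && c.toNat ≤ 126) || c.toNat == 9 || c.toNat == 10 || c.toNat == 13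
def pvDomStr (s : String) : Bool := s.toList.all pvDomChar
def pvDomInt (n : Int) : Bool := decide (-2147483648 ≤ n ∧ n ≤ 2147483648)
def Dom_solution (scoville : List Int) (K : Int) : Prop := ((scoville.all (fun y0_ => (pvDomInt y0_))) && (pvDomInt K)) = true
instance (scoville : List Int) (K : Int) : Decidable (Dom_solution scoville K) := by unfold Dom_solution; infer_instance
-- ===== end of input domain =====

-- B replaces A's binary heap with a plain sorted list (pop two smallest from the front,
-- linear re-insertion of the mix); simpler structure, same return value wherever A returns.


-- ===== PORT A =====
-- A keeps the heap in a Python list; hget i is heap[i] (indices the ports use are in range),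
-- hswap exchanges two slots.
def hget (l : List Int) (i : Nat) : Int := (l[i]?).getD 0
def hswap (l : List Int) (i j : Nat) : List Int := (l.set i (hget l j)).set j (hget l i)

-- heapq's sift-up: bubble position i towards the root while smaller than its parent.
-- (fuel-guarded structural recursion: i strictly decreases, so fuel = i always suffices)
def siftUpGo : Nat → List Int → Nat → List Int
  | 0, l, _ => l
  | fuel + 1, l, i =>
    if i = 0 then l
    else if hget l i < hget l ((i - 1) / 2) then siftUpGo fuel (hswap l i ((i - 1) / 2)) ((i - 1) / 2)
    else l

def siftUp (l : List Int) (i : Nat) : List Int := siftUpGo i l i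

-- the child of i holding the smaller value (the position heapq's _siftup chases)
def minChild (l : List Int) (i : Nat) : Nat :=
  if 2 * i + 2 < l.length ∧ hget l (2 * i + 2) < hget l (2 * i + 1)
  then 2 * i + 2 else 2 * i + 1

-- heapq's sift-down from position i: swap with the smaller child while larger than it.
-- (fuel-guarded structural recursion: i strictly increases below l.length, so fuel = l.length suffices)
def siftDownGo : Nat → List Int → Nat → List Int
  | 0, l, _ => l
  | fuel + 1, l, i =>
    if 2 * i + 1 < l.length then
      if hget l (minChild l i) < hget l i then siftDownGo fuel (hswap l i (minChild l i)) (minChild l i)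
      else l
    else l

def siftDown (l : List Int) (i : Nat) : List Int := siftDownGo (l.length - i) l i

-- heappush: append, then sift up from the last slot.
def heappush (l : List Int) (x : Int) : List Int := siftUp (l ++ [x]) l.length

-- heappop: remove the last element, move it to the root, sift down; returns (min, rest).
def heappop (l : List Int) : Int × List Int :=
  let lastelt := hget l (l.length - 1)
  let rest := l.dropLast
  if rest.isEmpty then (lastelt, [])
  else (hget rest 0, siftDown (rest.set 0 lastelt) 0)

-- A's while loop: answer accumulates; state is the heap.
-- (fuel-guarded: every iteration shrinks the heap by one, so fuel = initial length suffices)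
def loopA : Nat → List Int → Int → Int → Int
  | 0, _, _, answer => answer
  | fuel + 1, l, K, answer =>
    if hget l 0 < K then
      if 2 ≤ l.length then
        loopA fuel
          (heappush (heappop (heappop l).2).2 ((heappop l).1 + (heappop (heappop l).2).1 * 2))
          K (answer + 1)
      else -1
    else answer

def solution (scoville : List Int) (K : Int) : Int :=
  loopA scoville.length (scoville.foldl heappush []) K 0

-- ===== PORT B =====
-- linear insertion into a sorted list (Source B's inner while + insert)
def insortB (x : Int) : List Int → List Int
  | [] => [x]
  | y :: t => if y < x then y :: insortB x t else x :: y :: t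

-- B's while loop on the sorted list: pop the two front elements, reinsert the mix.
-- (fuel-guarded: every iteration shrinks the list by one, so fuel = initial length suffices)
def loopB : Nat → List Int → Int → Int → Int
  | 0, _, _, answer => answer
  | fuel + 1, l, K, answer =>
    match l with
    | [] => 0
    | [a] => if a < K then -1 else answer
    | a :: b :: t =>
      if a < K then loopB fuel (insortB (a + b * 2) t) K (answer + 1) else answer

def solution_alt (scoville : List Int) (K : Int) : Int :=
  loopB scoville.length (PySem.List.sorted scoville (fun x => x) false) K 0

-- ===== PRECONDITION & SPEC =====
-- Pre_ excludes only the empty list, on which A raises IndexError at `hq[0]` (B raises there too).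
def Pre_solution (scoville : List Int) (K : Int) : Prop := scoville ≠ []
instance (scoville : List Int) (K : Int) : Decidable (Pre_solution scoville K) := by
  unfold Pre_solution; infer_instance

def pvWitness_solution : List Int × Int := ([1, 2, 3, 9, 10, 12], 7)

def Spec_solution (scoville : List Int) (K : Int) (out : Int) : Prop := out = solution_alt scoville K
instance (scoville : List Int) (K : Int) (out : Int) : Decidable (Spec_solution scoville K out) := by
  unfold Spec_solution; infer_instance

-- ===== CLAIM (what is proved, stated in full; the proofs are below) =====
def Claim_equal_solution : Prop := ∀ (scoville : List Int) (K : Int), Dom_solution scoville K → Pre_solution scoville K → Spec_solution scoville K (solution scoville K)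

-- ===== LEMMAS AND PROOFS =====

theorem hswap_length (l : List Int) (i j : Nat) : (hswap l i j).length = l.length := by
  simp [hswap]

theorem siftUpGo_length : ∀ (fuel : Nat) (l : List Int) (i : Nat),
    (siftUpGo fuel l i).length = l.length := by
  intro fuel
  induction fuel with
  | zero => intro l i; rfl
  | succ fuel ih =>
    intro l i
    rw [siftUpGo]
    split_ifs
    · rfl
    · rw [ih, hswap_length]
    · rfl

theorem siftUp_length (l : List Int) (i : Nat) : (siftUp l i).length = l.length :=
  siftUpGo_length i l i

theorem siftDownGo_length : ∀ (fuel : Nat) (l : List Int) (i : Nat),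
    (siftDownGo fuel l i).length = l.length := by
  intro fuel
  induction fuel with
  | zero => intro l i; rfl
  | succ fuel ih =>
    intro l i
    rw [siftDownGo]
    split_ifs
    · rw [ih, hswap_length]
    · rfl
    · rfl

theorem siftDown_length (l : List Int) (i : Nat) : (siftDown l i).length = l.length :=
  siftDownGo_length _ l i

theorem heappush_length (l : List Int) (x : Int) :
    (heappush l x).length = l.length + 1 := by
  simp [heappush, siftUp_length]

theorem heappop_length (l : List Int) (h : l ≠ []) :
    (heappop l).2.length = l.length - 1 := by
  unfold heappop
  by_cases he : l.dropLast.isEmpty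
  · simp only [he, if_true]
    have : l.length = 1 := by
      rcases l with _ | ⟨a, _ | ⟨b, t⟩⟩ <;> simp_all [List.dropLast]
    simp [this]
  · simp [he, siftDown_length, List.length_dropLast]

def IsHeap (l : List Int) : Prop :=
  ∀ j, j < l.length → 0 < j → hget l ((j - 1) / 2) ≤ hget l j

-- heap except possibly the edge into i, with i's children still bounded by i's parent
def AlmostUp (l : List Int) (i : Nat) : Prop :=
  (∀ j, j < l.length → 0 < j → j ≠ i → hget l ((j - 1) / 2) ≤ hget l j) ∧
  (∀ c, c < l.length → 0 < c → (c - 1) / 2 = i → 0 < i → hget l ((i - 1) / 2) ≤ hget l c)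

-- heap except possibly the edges out of i, with i's children bounded by i's parent
def AlmostDown (l : List Int) (i : Nat) : Prop :=
  (∀ j, j < l.length → 0 < j → (j - 1) / 2 ≠ i → hget l ((j - 1) / 2) ≤ hget l j) ∧
  (0 < i → ∀ c, c < l.length → (c - 1) / 2 = i → hget l ((i - 1) / 2) ≤ hget l c)

theorem hget_eq (l : List Int) (i : Nat) (h : i < l.length) : hget l i = l[i] := by
  simp [hget, List.getElem?_eq_getElem h]

theorem hget_set (l : List Int) (i : Nat) (x : Int) (h : i < l.length) (j : Nat) :
    hget (l.set i x) j = if j = i then x else hget l j := by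
  simp only [hget, List.getElem?_set]
  rcases eq_or_ne i j with rfl | hne
  · simp [h]
  · simp [hne, Ne.symm hne]

theorem hswap_hget (l : List Int) (i j : Nat) (hi : i < l.length) (hj : j < l.length) (k : Nat) :
    hget (hswap l i j) k = if k = j then hget l i else if k = i then hget l j else hget l k := by
  simp only [hswap]
  rw [hget_set _ _ _ (by simpa using hj), hget_set _ _ _ hi]

theorem cons_set_perm (t : List Int) (m : Nat) (x : Int) (h : m < t.length) :
    (hget t m :: t.set m x).Perm (x :: t) := by
  induction t generalizing m with
  | nil => simp at h
  | cons a t ih =>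
    cases m with
    | zero =>
      simp only [hget, List.getElem?_cons_zero, Option.getD_some, List.set_cons_zero]
      exact List.Perm.swap _ _ _
    | succ m =>
      have h' : m < t.length := by simpa using h
      simp only [hget, List.getElem?_cons_succ, List.set_cons_succ]
      exact ((List.Perm.swap _ _ _).trans (((ih m h').cons a).trans (List.Perm.swap _ _ _)))

theorem hswap_perm (l : List Int) (i j : Nat) (hi : i < l.length) (hj : j < l.length) :
    (hswap l i j).Perm l := by
  rcases eq_or_ne i j with rfl | hne
  · unfold hswap
    rw [List.set_set, hget_eq _ _ hi, List.set_getElem_self]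
  · have h1 := cons_set_perm l i (hget l j) hi
    have h2 := cons_set_perm (l.set i (hget l j)) j (hget l i) (by simpa using hj)
    rw [hget_set _ _ _ hi, if_neg (Ne.symm hne)] at h2
    exact ((h2.trans h1).cons_inv : (hswap l i j).Perm l)

theorem hget_append (l : List Int) (x : Int) (i : Nat) (h : i < l.length) :
    hget (l ++ [x]) i = hget l i := by
  simp [hget, List.getElem?_append_left h]

theorem rootMin (l : List Int) (h : IsHeap l) :
    ∀ i, i < l.length → hget l 0 ≤ hget l i := by
  intro i
  induction i using Nat.strong_induction_on with
  | _ i ih =>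
    intro hi
    rcases Nat.eq_zero_or_pos i with h0 | h0
    · subst h0; exact le_refl _
    · exact le_trans (ih ((i - 1) / 2) (by omega) (by omega)) (h i hi h0)

theorem siftUpGo_spec : ∀ (fuel : Nat) (l : List Int) (i : Nat), i ≤ fuel → i < l.length →
    AlmostUp l i → IsHeap (siftUpGo fuel l i) ∧ (siftUpGo fuel l i).Perm l := by
  intro fuel
  induction fuel with
  | zero =>
    intro l i hf hi ha
    have h0 : i = 0 := by omega
    subst h0
    exact ⟨fun j hj hj0 => ha.1 j hj hj0 (by omega), List.Perm.refl l⟩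
  | succ fuel ih =>
    intro l i hf hi ha
    rw [siftUpGo]
    split
    · next h0 =>
      subst h0
      exact ⟨fun j hj hj0 => ha.1 j hj hj0 (by omega), List.Perm.refl l⟩
    · next h0 =>
      split
      · next hlt =>
        have hp : (i - 1) / 2 < l.length := by omega
        have hsw : ∀ k, hget (hswap l i ((i - 1) / 2)) k =
            if k = (i - 1) / 2 then hget l i
            else if k = i then hget l ((i - 1) / 2) else hget l k :=
          hswap_hget l i ((i - 1) / 2) hi hp
        have hlen : (hswap l i ((i - 1) / 2)).length = l.length := hswap_length l i _
        have halm : AlmostUp (hswap l i ((i - 1) / 2)) ((i - 1) / 2) := by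
          constructor
          · intro j hj hj0 hjp
            rw [hlen] at hj
            rw [hsw, hsw]
            by_cases hji : j = i
            · subst hji
              rw [if_pos rfl, if_neg (by omega : ¬ j = (j - 1) / 2), if_pos rfl]
              exact le_of_lt hlt
            · by_cases hqi : (j - 1) / 2 = i
              · rw [if_neg (by omega), if_pos hqi, if_neg hjp, if_neg hji]
                exact ha.2 j hj hj0 hqi (by omega)
              · by_cases hqp : (j - 1) / 2 = (i - 1) / 2
                · rw [if_pos hqp, if_neg hjp, if_neg hji]
                  refine le_trans (le_of_lt hlt) ?_
                  have := ha.1 j hj hj0 hji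
                  rw [hqp] at this
                  exact this
                · rw [if_neg hqp, if_neg hqi, if_neg hjp, if_neg hji]
                  exact ha.1 j hj hj0 hji
          · intro c hc hc0 hcp hp0
            rw [hlen] at hc
            rw [hsw, hsw]
            rw [if_neg (by omega : ¬ ((i - 1) / 2 - 1) / 2 = (i - 1) / 2),
                if_neg (by omega : ¬ ((i - 1) / 2 - 1) / 2 = i)]
            have hgle : hget l (((i - 1) / 2 - 1) / 2) ≤ hget l ((i - 1) / 2) :=
              ha.1 ((i - 1) / 2) hp hp0 (by omega)
            by_cases hci : c = i
            · rw [if_neg (by omega : ¬ c = (i - 1) / 2), if_pos hci]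
              exact hgle
            · rw [if_neg (by omega : ¬ c = (i - 1) / 2), if_neg hci]
              refine le_trans hgle ?_
              have := ha.1 c hc hc0 hci
              rw [hcp] at this
              exact this
        obtain ⟨hH, hP⟩ := ih _ ((i - 1) / 2) (by omega) (by omega) halm
        exact ⟨hH, hP.trans (hswap_perm l i _ hi hp)⟩
      · next hlt =>
        refine ⟨?_, List.Perm.refl l⟩
        intro j hj hj0
        by_cases hji : j = i
        · subst hji
          exact not_lt.mp hlt
        · exact ha.1 j hj hj0 hji

theorem siftUp_spec (l : List Int) (i : Nat) (hi : i < l.length) (ha : AlmostUp l i) :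
    IsHeap (siftUp l i) ∧ (siftUp l i).Perm l :=
  siftUpGo_spec i l i (le_refl i) hi ha

theorem minChild_eq (l : List Int) (i : Nat) :
    minChild l i = 2 * i + 1 ∨ minChild l i = 2 * i + 2 := by
  unfold minChild; split <;> omega

theorem minChild_lt (l : List Int) (i : Nat) (h1 : 2 * i + 1 < l.length) :
    i < minChild l i ∧ minChild l i < l.length := by
  unfold minChild; split <;> omega

theorem minChild_min (l : List Int) (i : Nat) (h1 : 2 * i + 1 < l.length) :
    hget l (minChild l i) ≤ hget l (2 * i + 1) ∧
      (2 * i + 2 < l.length → hget l (minChild l i) ≤ hget l (2 * i + 2)) := by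
  unfold minChild
  split
  · next h => exact ⟨le_of_lt h.2, fun _ => le_refl _⟩
  · next h =>
    refine ⟨le_refl _, fun h2 => ?_⟩
    rcases not_and_or.mp h with h3 | h3
    · exact absurd h2 h3
    · exact not_lt.mp h3

theorem noChild_heap (l : List Int) (i : Nat) (h1 : ¬ 2 * i + 1 < l.length)
    (ha : AlmostDown l i) : IsHeap l := by
  intro j hj hj0
  by_cases hqi : (j - 1) / 2 = i
  · omega
  · exact ha.1 j hj hj0 hqi

theorem siftDownGo_spec : ∀ (fuel : Nat) (l : List Int) (i : Nat), l.length - i ≤ fuel →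
    AlmostDown l i → IsHeap (siftDownGo fuel l i) ∧ (siftDownGo fuel l i).Perm l := by
  intro fuel
  induction fuel with
  | zero =>
    intro l i hn ha
    exact ⟨noChild_heap l i (by omega) ha, List.Perm.refl l⟩
  | succ n ihn =>
    intro l i hn ha
    rw [siftDownGo]
    split
    · next h1 =>
      obtain ⟨hic, hcl⟩ := minChild_lt l i h1
      obtain ⟨hm1, hm2⟩ := minChild_min l i h1
      have hc12 := minChild_eq l i
      split
      · next hlt =>
        have hsw : ∀ k, hget (hswap l i (minChild l i)) k =
            if k = minChild l i then hget l i
            else if k = i then hget l (minChild l i) else hget l k :=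
          hswap_hget l i (minChild l i) (by omega) hcl
        have halm : AlmostDown (hswap l i (minChild l i)) (minChild l i) := by
          constructor
          · intro j hj hj0 hjc
            rw [hswap_length] at hj
            rw [hsw, hsw]
            by_cases hjc' : j = minChild l i
            · rw [(by omega : (j - 1) / 2 = i), if_neg (by omega : ¬ i = minChild l i),
                  if_pos rfl, if_pos hjc']
              exact le_of_lt hlt
            · by_cases hji : j = i
              · rw [if_neg (by omega : ¬ (j - 1) / 2 = minChild l i),
                    if_neg (by omega : ¬ (j - 1) / 2 = i), if_neg hjc', if_pos hji, hji]
                exact ha.2 (by omega) (minChild l i) hcl (by omega)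
              · by_cases hqi : (j - 1) / 2 = i
                · rw [if_neg (by omega : ¬ (j - 1) / 2 = minChild l i), if_pos hqi,
                      if_neg hjc', if_neg hji]
                  rcases (by omega : j = 2 * i + 1 ∨ j = 2 * i + 2) with rfl | rfl
                  · exact hm1
                  · exact hm2 hj
                · rw [if_neg hjc, if_neg hqi, if_neg hjc', if_neg hji]
                  exact ha.1 j hj hj0 hqi
          · intro _ gc hgc hq
            rw [hswap_length] at hgc
            rw [hsw, hsw]
            rw [(by omega : (minChild l i - 1) / 2 = i),
                if_neg (by omega : ¬ i = minChild l i), if_pos rfl,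
                if_neg (by omega : ¬ gc = minChild l i), if_neg (by omega : ¬ gc = i)]
            have := ha.1 gc hgc (by omega) (by omega)
            rw [hq] at this
            exact this
        obtain ⟨hH, hP⟩ := ihn (hswap l i (minChild l i)) (minChild l i)
          (by rw [hswap_length]; omega) halm
        exact ⟨hH, hP.trans (hswap_perm l i (minChild l i) (by omega) hcl)⟩
      · next hlt =>
        refine ⟨?_, List.Perm.refl l⟩
        intro j hj hj0
        by_cases hqi : (j - 1) / 2 = i
        · rw [hqi]
          refine le_trans (not_lt.mp hlt) ?_
          rcases (by omega : j = 2 * i + 1 ∨ j = 2 * i + 2) with rfl | rfl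
          · exact hm1
          · exact hm2 hj

        · exact ha.1 j hj hj0 hqi
    · next h1 =>
      exact ⟨noChild_heap l i h1 ha, List.Perm.refl l⟩

theorem siftDown_spec (l : List Int) (i : Nat) (ha : AlmostDown l i) :
    IsHeap (siftDown l i) ∧ (siftDown l i).Perm l :=
  siftDownGo_spec (l.length - i) l i (le_refl _) ha

theorem heappush_spec (l : List Int) (x : Int) (h : IsHeap l) :
    IsHeap (heappush l x) ∧ (heappush l x).Perm (x :: l) := by
  unfold heappush
  have hlen : l.length < (l ++ [x]).length := by simp
  have halm : AlmostUp (l ++ [x]) l.length := by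
    constructor
    · intro j hj hj0 hjn
      simp only [List.length_append, List.length_cons, List.length_nil] at hj
      have hjl : j < l.length := by omega
      rw [hget_append _ _ _ hjl, hget_append _ _ _ (by omega)]
      exact h j hjl hj0
    · intro c hc hc0 hceq _
      simp only [List.length_append, List.length_cons, List.length_nil] at hc
      omega
  obtain ⟨hH, hP⟩ := siftUp_spec (l ++ [x]) l.length hlen halm
  exact ⟨hH, hP.trans (List.perm_append_singleton x l)⟩

theorem heappop_spec (l : List Int) (hne : l ≠ []) (h : IsHeap l) :
    (heappop l).1 = hget l 0 ∧ ((heappop l).1 :: (heappop l).2).Perm l ∧ IsHeap (heappop l).2 := by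
  have hl0 : 0 < l.length := List.length_pos_iff.mpr hne
  by_cases hre : l.dropLast.isEmpty
  · have h1 : l.length = 1 := by
      have : l.dropLast.length = l.length - 1 := List.length_dropLast
      rw [List.isEmpty_iff.mp hre] at this
      simp at this
      omega
    obtain ⟨a, rfl⟩ := List.length_eq_one_iff.mp h1
    simp [heappop, hget, IsHeap]
  · have hrl : l.dropLast.length = l.length - 1 := List.length_dropLast
    have hrne : l.dropLast ≠ [] := fun h0 => hre (by simp [h0])
    have hr0 : 0 < l.dropLast.length := List.length_pos_iff.mpr hrne
    have hn2 : 2 ≤ l.length := by omega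
    have hpop : heappop l =
        (hget l.dropLast 0, siftDown (l.dropLast.set 0 (hget l (l.length - 1))) 0) := by
      rw [heappop]
      simp [hre]
    have hget_dl : ∀ k, k < l.length - 1 → hget l.dropLast k = hget l k := by
      intro k hk
      rw [hget, hget, List.getElem?_eq_getElem (by omega), List.getElem?_eq_getElem (by omega),
          Option.getD_some, Option.getD_some, List.getElem_dropLast]
    have halm : AlmostDown (l.dropLast.set 0 (hget l (l.length - 1))) 0 := by
      constructor
      · intro j hj hj0 hjq
        rw [List.length_set] at hj
        rw [hget_set _ _ _ hr0, hget_set _ _ _ hr0, if_neg (by omega : ¬ j = 0),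
            if_neg (by omega : ¬ (j - 1) / 2 = 0)]
        rw [hget_dl j (by omega), hget_dl _ (by omega)]
        exact h j (by omega) hj0
      · intro h0 _ _ _
        omega
    obtain ⟨hH, hP⟩ := siftDown_spec (l.dropLast.set 0 (hget l (l.length - 1))) 0 halm
    rw [hpop]
    have hr00 : hget l.dropLast 0 = hget l 0 := hget_dl 0 (by omega)
    refine ⟨hr00, ?_, hH⟩
    rw [hr00]
    refine ((hP.cons (hget l 0)).trans ?_ : (hget l 0 :: siftDown _ 0).Perm l)
    obtain ⟨r0, rt, hrcons⟩ := List.exists_cons_of_ne_nil hrne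
    have hlast : l = l.dropLast ++ [hget l (l.length - 1)] := by
      conv_lhs => rw [← List.dropLast_append_getLast hne]
      rw [hget_eq _ _ (by omega), List.getLast_eq_getElem]
    have hr0v : r0 = hget l 0 := by
      rw [← hget_dl 0 (by omega), hrcons]
      simp [hget]
    rw [hrcons, List.set_cons_zero]
    conv_rhs => rw [hlast, hrcons, hr0v]
    simp only [List.cons_append]
    exact (List.perm_append_singleton _ _).symm.cons _

theorem minEq (l : List Int) (a : Int) (m : List Int) (h : IsHeap l)
    (hp : l.Perm (a :: m)) (hs : (a :: m).Pairwise (· ≤ ·)) : hget l 0 = a := by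
  have hne : l ≠ [] := by intro h0; subst h0; exact absurd hp.length_eq (by simp)
  have hlen : 0 < l.length := List.length_pos_iff.mpr hne
  have h0mem : l[0] ∈ (a :: m) := hp.mem_iff.mp (List.getElem_mem hlen)
  have hamem : a ∈ l := hp.mem_iff.mpr (by simp)
  obtain ⟨i, hilt, hia⟩ := List.mem_iff_getElem.mp hamem
  have h1 : hget l 0 ≤ a := by
    rw [← hia, ← hget_eq _ _ hilt]; exact rootMin l h i hilt
  have h2 : a ≤ l[0] := by
    rcases List.mem_cons.mp h0mem with h3 | h3
    · omega
    · exact (List.pairwise_cons.mp hs).1 _ h3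
  rw [hget_eq _ _ hlen] at h1 ⊢; omega

theorem insortB_perm (x : Int) (l : List Int) : (insortB x l).Perm (x :: l) := by
  induction l with
  | nil => exact List.Perm.refl _
  | cons y t ih =>
    simp only [insortB]
    split_ifs
    · exact (ih.cons y).trans (List.Perm.swap _ _ _)
    · exact List.Perm.refl _

theorem insortB_sorted (x : Int) (l : List Int) (h : l.Pairwise (· ≤ ·)) :
    (insortB x l).Pairwise (· ≤ ·) := by
  induction l with
  | nil => simp [insortB]
  | cons y t ih =>
    obtain ⟨hy, ht⟩ := List.pairwise_cons.mp h
    simp only [insortB]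
    split_ifs with hlt
    · refine List.pairwise_cons.mpr ⟨?_, ih ht⟩
      intro z hz
      rcases List.mem_cons.mp ((insortB_perm x t).mem_iff.mp hz) with rfl | h1
      · omega
      · exact hy z h1
    · refine List.pairwise_cons.mpr ⟨?_, h⟩
      intro z hz
      rcases List.mem_cons.mp hz with rfl | h1
      · omega
      · exact le_trans (not_lt.mp hlt) (hy z h1)

theorem main_loop : ∀ (fa fb : Nat) (l m : List Int) (K ans : Int), l.length ≤ fa →
    l.length ≤ fb → l ≠ [] → l.Perm m → IsHeap l → m.Pairwise (· ≤ ·) →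
    loopA fa l K ans = loopB fb m K ans := by
  intro fa
  induction fa with
  | zero =>
    intro fb l m K ans hla hlb hne _ _ _
    exact absurd (List.eq_nil_of_length_eq_zero (by omega)) hne
  | succ n fbihn =>
    intro fb l m K ans hla hlb hne hperm hheap hsort
    rcases fb with _ | fb
    · exact absurd (List.eq_nil_of_length_eq_zero (by omega)) hne
    have ihn := fun l m K ans h1 h2 => fbihn fb l m K ans h1 h2
    have hm : m ≠ [] := by
      intro h0
      subst h0
      exact hne (List.perm_nil.mp hperm)
    obtain ⟨a, m', rfl⟩ := List.exists_cons_of_ne_nil hm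
    have ha0 : hget l 0 = a := minEq l a m' hheap hperm hsort
    have hml : (a :: m').length = l.length := hperm.length_eq.symm
    rw [loopA]
    by_cases hK : a < K
    · rw [ha0, if_pos hK]
      by_cases h2 : 2 ≤ l.length
      · rw [if_pos h2]
        obtain ⟨b, t, rfl⟩ := List.exists_cons_of_ne_nil
          (show m' ≠ [] by intro h0; rw [h0] at hml; simp at hml; omega)
        obtain ⟨hp1, hp2, hH1⟩ := heappop_spec l hne hheap
        rw [hp1, ha0] at hp2
        have hperm1 : (heappop l).2.Perm (b :: t) := (hp2.trans hperm).cons_inv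
        have hlen1 : (heappop l).2.length = l.length - 1 := heappop_length l hne
        have hne1 : (heappop l).2 ≠ [] := by
          intro h0
          rw [h0] at hlen1
          simp at hlen1
          omega
        have hsort' : (b :: t).Pairwise (· ≤ ·) := hsort.of_cons
        have hb : hget (heappop l).2 0 = b := minEq _ b t hH1 hperm1 hsort'
        obtain ⟨hq1, hq2, hH2⟩ := heappop_spec (heappop l).2 hne1 hH1
        rw [hq1, hb] at hq2
        have hperm2 : (heappop (heappop l).2).2.Perm t := (hq2.trans hperm1).cons_inv
        have hlen2 : (heappop (heappop l).2).2.length = l.length - 2 := by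
          rw [heappop_length _ hne1, hlen1]
          omega
        obtain ⟨hH3, hp3⟩ := heappush_spec (heappop (heappop l).2).2 (a + b * 2) hH2
        have hperm3 : (heappush (heappop (heappop l).2).2 (a + b * 2)).Perm
            (insortB (a + b * 2) t) :=
          hp3.trans ((hperm2.cons _).trans (insortB_perm _ t).symm)
        have hlen3 : (heappush (heappop (heappop l).2).2 (a + b * 2)).length = l.length - 1 := by
          rw [heappush_length, hlen2]
          omega
        have hne3 : (heappush (heappop (heappop l).2).2 (a + b * 2)) ≠ [] := by
          intro h0
          rw [h0] at hlen3
          simp at hlen3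
          omega
        have hs3 : (insortB (a + b * 2) t).Pairwise (· ≤ ·) :=
          insortB_sorted _ t hsort'.of_cons
        rw [hp1, ha0, hq1, hb]
        rw [ihn _ _ K (ans + 1) (by omega) (by omega) hne3 hperm3 hH3 hs3]
        conv_rhs => rw [loopB]
        rw [if_pos hK]
      · rw [if_neg h2]
        have hm' : m' = [] := by
          rcases m' with _ | ⟨c, t⟩
          · rfl
          · simp at hml
            omega
        subst hm'
        rw [loopB, if_pos hK]
    · rw [ha0, if_neg hK]
      rcases m' with _ | ⟨c, t⟩
      · rw [loopB, if_neg hK]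
      · rw [loopB, if_neg hK]

theorem buildHeap (xs : List Int) : ∀ acc, IsHeap acc →
    IsHeap (xs.foldl heappush acc) ∧ (xs.foldl heappush acc).Perm (acc ++ xs) := by
  induction xs with
  | nil => intro acc h; exact ⟨h, by simpa using List.Perm.refl acc⟩
  | cons x t ih =>
    intro acc h
    obtain ⟨hH, hP⟩ := heappush_spec acc x h
    obtain ⟨hH2, hP2⟩ := ih (heappush acc x) hH
    refine ⟨hH2, hP2.trans ?_⟩
    exact (hP.append_right t).trans (by simpa using (List.perm_middle (a := x) (l₁ := acc) (l₂ := t)).symm)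

-- ===== VERDICT (by name: the statement is the Claim_ definition above) =====
theorem solution_spec : Claim_equal_solution := by
  intro scoville K _ hpre
  unfold Spec_solution solution solution_alt
  have hH0 : IsHeap ([] : List Int) := by intro j hj; simp at hj
  obtain ⟨hH, hP⟩ := buildHeap scoville [] hH0
  simp only [List.nil_append] at hP
  have hsp : (PySem.List.sorted scoville (fun x => x) false).Perm scoville :=
    PySem.List.sorted_perm _ _ _
  have hss : (PySem.List.sorted scoville (fun x => x) false).Pairwise (· ≤ ·) := by
    have := PySem.List.sorted_pairwise scoville (fun x => x)
    simpa using this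
  have hne : (scoville.foldl heappush []) ≠ [] := by
    intro h0
    have := hP.length_eq
    rw [h0] at this
    simp at this
    exact hpre (List.eq_nil_of_length_eq_zero this.symm)
  have hlenf : (scoville.foldl heappush []).length = scoville.length := by
    have := hP.length_eq
    simpa using this
  exact main_loop scoville.length scoville.length _ _ K 0 (by omega) (by omega) hne
    (hP.trans hsp.symm) hH hss
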